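-- pv_equiv track=rewrite | github.com/emiliovfx/Blender-PlaneMaker-add-on | broken/cis_bodies2pm.py | _pm_i_print_order
-- ===== SOURCE A (Python) =====
-- from typing import Dict, List, Tuple, Any
--
-- def _pm_i_print_order(total_stations: int = 20) -> List[int]:
--     order: List[int] = []
--     if total_stations > 0:
--         order.append(0)
--     if total_stations > 1:
--         order.append(1)
--     for i in range(10, total_stations):
--         order.append(i)
--     for i in range(2, 10):
--         if i < total_stations and i not in order:
--             order.append(i)
--     return order
-- ===== SOURCE B (Python) =====
-- from typing import List
--
-- def _pm_i_print_order(total_stations: int = 20) -> List[int]: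
--     # One sort over the full index range: indices 2..9 get key x+total_stations,
--     # pushing them after everything else; 0,1 and 10.. keep key x, so the key
--     # order is 0,1 < 10..total_stations-1 < 2..9 exactly as required.
--     return sorted(range(total_stations),
--                   key=lambda x: x + total_stations if 2 <= x <= 9 else x)
-- ===== Notes on version B (the rewrite author's own statement) =====
-- stated objective: alternative
-- what changed: Replaces A's three staged append passes (with a membership guard) by building range(total_stations) once and sorting it with a single integer priority key (x+total_stations for 2<=x<=9, x otherwise) that realises the 0,1 / 10.. / 2..9 order.
import Mathlib
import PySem

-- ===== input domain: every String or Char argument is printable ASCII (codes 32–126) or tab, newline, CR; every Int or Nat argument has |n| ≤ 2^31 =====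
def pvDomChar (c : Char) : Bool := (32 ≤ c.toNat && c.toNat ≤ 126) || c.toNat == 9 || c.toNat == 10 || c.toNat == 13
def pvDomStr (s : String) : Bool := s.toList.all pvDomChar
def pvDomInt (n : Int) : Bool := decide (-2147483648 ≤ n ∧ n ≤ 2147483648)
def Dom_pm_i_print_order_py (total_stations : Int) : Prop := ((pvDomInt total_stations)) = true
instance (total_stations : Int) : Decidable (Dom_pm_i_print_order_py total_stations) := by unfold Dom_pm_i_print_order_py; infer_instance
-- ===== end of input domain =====

-- B builds range(total_stations) once and orders it by one sort with an integer
-- priority key instead of A's three staged append passes (objective: alternative).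

-- ===== PORT A =====
def pm_i_print_order_py (total_stations : Int) : List Int :=
  let order : List Int := []
  let order := if total_stations > 0 then order ++ [0] else order
  let order := if total_stations > 1 then order ++ [1] else order
  let order := (PySem.List.pyRange 10 total_stations 1).foldl
    (fun acc i => acc ++ [i]) order
  let order := (PySem.List.pyRange 2 10 1).foldl
    (fun acc i => if i < total_stations && !(acc.contains i) then acc ++ [i] else acc) order
  order

-- ===== PORT B =====
def pm_i_print_order_py_alt (total_stations : Int) : List Int :=
  PySem.List.sorted (PySem.List.pyRange 0 total_stations 1)
    (fun x => if 2 ≤ x ∧ x ≤ 9 then x + total_stations else x) false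

-- ===== PRECONDITION & SPEC =====
def Spec_pm_i_print_order_py (total_stations : Int) (out : List Int) : Prop := out = pm_i_print_order_py_alt total_stations
instance (total_stations : Int) (out : List Int) : Decidable (Spec_pm_i_print_order_py total_stations out) := by unfold Spec_pm_i_print_order_py; infer_instance

-- ===== CLAIM (what is proved, stated in full; the proofs are below) =====
def Claim_equal_pm_i_print_order_py : Prop := ∀ (total_stations : Int), Dom_pm_i_print_order_py total_stations → Spec_pm_i_print_order_py total_stations (pm_i_print_order_py total_stations)

-- ===== LEMMAS AND PROOFS =====

-- A's first for-loop only appends: it is init ++ the range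
theorem pv_foldl_app (l : List Int) (init : List Int) :
    l.foldl (fun acc i => acc ++ [i]) init = init ++ l := by
  induction l generalizing init with
  | nil => simp
  | cons x xs ih => simp [List.foldl_cons, ih, List.append_assoc]

-- A's second for-loop: when no element of l is already in acc and l has no duplicates,
-- the membership guard never fires, so it appends exactly the filtered list
theorem pv_foldl_filter (n : Int) (l : List Int) (acc : List Int)
    (hnd : l.Nodup) (h : ∀ i ∈ l, i ∉ acc) :
    l.foldl (fun acc i => if i < n && !(acc.contains i) then acc ++ [i] else acc) acc
      = acc ++ l.filter (fun i => decide (i < n)) := by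
  induction l generalizing acc with
  | nil => simp
  | cons x xs ih =>
    have hx : acc.contains x = false := by
      simp only [List.contains_eq_mem, decide_eq_false_iff_not]; exact h x (by simp)
    rw [List.foldl_cons]
    by_cases hlt : x < n
    · simp only [hx, hlt, decide_true, Bool.not_false, Bool.and_true, if_true]
      rw [ih _ (List.Nodup.of_cons hnd) ?_]
      · simp [hlt]
      · intro i hi
        simp only [List.mem_append, List.mem_singleton]
        rintro (hiacc | rfl)
        · exact h i (List.mem_cons_of_mem _ hi) hiacc
        · exact (List.nodup_cons.mp hnd).1 hi
    · simp only [hlt, decide_false, Bool.false_and, Bool.false_eq_true, if_false]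
      rw [ih _ (List.Nodup.of_cons hnd) (fun i hi => h i (List.mem_cons_of_mem _ hi))]
      simp [hlt]

theorem pv_filter_range (n : Int) :
    (PySem.List.pyRange 2 10 1).filter (fun i => decide (i < n))
      = PySem.List.pyRange 2 (min n 10) 1 := by
  by_cases h : n ≤ 2
  · rw [show min n 10 = n from by omega]
    rw [show PySem.List.pyRange 2 10 1 = [2,3,4,5,6,7,8,9] from by decide,
        PySem.List.pyRange_one_eq_nil h]
    simp only [List.filter_eq_nil_iff, decide_eq_true_eq]
    intro a ha; fin_cases ha <;> omega
  · by_cases h10 : 10 ≤ n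
    · rw [show min n 10 = (10 : Int) from by omega]
      rw [show PySem.List.pyRange 2 10 1 = [2,3,4,5,6,7,8,9] from by decide]
      have : ∀ i ∈ ([2,3,4,5,6,7,8,9] : List Int), decide (i < n) = true := by
        intro a ha; fin_cases ha <;> simp <;> omega
      rw [List.filter_eq_self.mpr this]
    · rw [show min n 10 = n from by omega]
      interval_cases n <;> decide

theorem pv_head (n : Int) :
    ((if n > 0 then ([] : List Int) ++ [0] else []) ++ if n > 1 then [1] else ([] : List Int))
      = PySem.List.pyRange 0 (min n 2) 1 := by
  by_cases h : n ≤ 0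
  · rw [if_neg (by omega), if_neg (by omega), PySem.List.pyRange_one_eq_nil (by omega)]
    rfl
  · by_cases h1 : n ≤ 1
    · rw [if_pos (by omega), if_neg (by omega),
        show min n 2 = 1 from by omega,
        show PySem.List.pyRange 0 1 1 = [0] from by decide]
      rfl
    · rw [if_pos (by omega), if_pos (by omega),
        show min n 2 = 2 from by omega,
        show PySem.List.pyRange 0 2 1 = [0, 1] from by decide]
      rfl

-- A's result in closed form: three concatenated ranges
theorem pv_A_eq (n : Int) :
    pm_i_print_order_py n
      = PySem.List.pyRange 0 (min n 2) 1 ++ PySem.List.pyRange 10 n 1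
          ++ PySem.List.pyRange 2 (min n 10) 1 := by
  unfold pm_i_print_order_py
  simp only
  rw [pv_foldl_app]
  rw [pv_foldl_filter n _ _ (PySem.List.nodup_pyRange_one 2 10) ?_]
  · rw [pv_filter_range, ← pv_head n, List.append_assoc, List.append_assoc]
    split_ifs <;> simp
  · intro i hi hmem
    have hi' := (PySem.List.mem_pyRange_one).mp hi
    rcases List.mem_append.mp hmem with hmem | hmem
    · split at hmem <;> split at hmem <;> simp_all <;> omega
    · have := (PySem.List.mem_pyRange_one).mp hmem
      omega

-- A's concatenation is a rearrangement of range(0, n)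
theorem pv_perm (n : Int) :
    (PySem.List.pyRange 0 (min n 2) 1 ++ PySem.List.pyRange 10 n 1
        ++ PySem.List.pyRange 2 (min n 10) 1).Perm (PySem.List.pyRange 0 n 1) := by
  by_cases h2 : n ≤ 2
  · rw [show min n 2 = n from by omega, show min n 10 = n from by omega,
      PySem.List.pyRange_one_eq_nil (show n ≤ 10 from by omega),
      PySem.List.pyRange_one_eq_nil (show n ≤ 2 from by omega)]
    simp
  · rw [show min n 2 = (2 : Int) from by omega]
    by_cases h10 : n ≤ 10
    · rw [show min n 10 = n from by omega, PySem.List.pyRange_one_eq_nil h10,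
        PySem.List.pyRange_one_append 0 2 n (by omega) (by omega)]
      simp
    · rw [show min n 10 = (10 : Int) from by omega,
        PySem.List.pyRange_one_append 0 2 n (by omega) (by omega),
        PySem.List.pyRange_one_append 2 10 n (by omega) (by omega),
        List.append_assoc]
      exact (List.Perm.append_left _ (List.perm_append_comm)).trans (by simp)

-- A's concatenation is strictly increasing under B's sort key
theorem pv_pairwise (n : Int) :
    (PySem.List.pyRange 0 (min n 2) 1 ++ PySem.List.pyRange 10 n 1
        ++ PySem.List.pyRange 2 (min n 10) 1).Pairwise
      (fun a b => (if 2 ≤ a ∧ a ≤ 9 then a + n else a)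
                    < (if 2 ≤ b ∧ b ≤ 9 then b + n else b)) := by
  rw [List.append_assoc, List.pairwise_append, List.pairwise_append]
  refine ⟨?_, ⟨?_, ?_, ?_⟩, ?_⟩
  · exact (PySem.List.pairwise_lt_pyRange_one 0 (min n 2)).imp_of_mem
      (fun ha hb hlt => by
        have := (PySem.List.mem_pyRange_one).mp ha
        have := (PySem.List.mem_pyRange_one).mp hb
        split_ifs <;> omega)
  · exact (PySem.List.pairwise_lt_pyRange_one 10 n).imp_of_mem
      (fun ha hb hlt => by
        have := (PySem.List.mem_pyRange_one).mp ha
        have := (PySem.List.mem_pyRange_one).mp hb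
        split_ifs <;> omega)
  · exact (PySem.List.pairwise_lt_pyRange_one 2 (min n 10)).imp_of_mem
      (fun ha hb hlt => by
        have := (PySem.List.mem_pyRange_one).mp ha
        have := (PySem.List.mem_pyRange_one).mp hb
        split_ifs <;> omega)
  · intro a ha b hb
    have := (PySem.List.mem_pyRange_one).mp ha
    have := (PySem.List.mem_pyRange_one).mp hb
    split_ifs <;> omega
  · intro a ha b hb
    have ha' := (PySem.List.mem_pyRange_one).mp ha
    rcases List.mem_append.mp hb with hb | hb <;>
      have := (PySem.List.mem_pyRange_one).mp hb <;> split_ifs <;> omega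

-- ===== VERDICT (by name: the statement is the Claim_ definition above) =====
theorem pm_i_print_order_py_spec : Claim_equal_pm_i_print_order_py := by
  intro n _
  unfold Spec_pm_i_print_order_py pm_i_print_order_py_alt
  rw [pv_A_eq]
  exact Eq.symm (PySem.List.sorted_eq_of_perm_of_pairwise_lt _ _ _ (pv_perm n) (pv_pairwise n))
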